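-- pv_equiv track=rewrite | github.com/jaredabw/aura | funcs.py | get_aura_tagline
-- ===== SOURCE A (Python) =====
-- def get_aura_tagline(aura: int):
--     '''Get the aura tagline for a given aura value.
--
--     Parameters
--     ----------
--     aura: `int`
--         The aura value to get the tagline for.
--
--     Returns
--     -------
--     `str`
--         The tagline for the given aura value.'''
--     aura_ranges = [
--         (-float('inf'), -30, "Actually cooked."),
--         (-30, -20, "Forgot to mute their mic."),
--         (-20, -10, "Overshared after first date."),
--         (-10, 0, "Got up with their backpack open"),
--         (0, 10, "Novice aura farmer."),
--         (10, 20, "Autographed their own paper for Will Smith."),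
--         (20, 30, "Could probably pull a goth girl GF."),
--         (30, 40, "Got that drip."),
--         (40, 50, "W collector."),
--         (50, 60, "Mogging everyone else"),
--         (60, 70, "The huzz calls him pookie."),
--         (70, 80, "Radiates protagonist energy."),
--         (80, 90, "Literally goated."),
--         (90, 100, "Figured out how to actually mew."),
--         (100, 110, "Almost maxed out."),
--         (110, float('inf'), "Won at life.")
--     ]
--
--     for lower, upper, tag in aura_ranges:
--         if lower <= aura < upper:
--             return tag
-- ===== SOURCE B (Python) =====
-- TAGLINES = [
--     "Actually cooked.",
--     "Forgot to mute their mic.",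
--     "Overshared after first date.",
--     "Got up with their backpack open",
--     "Novice aura farmer.",
--     "Autographed their own paper for Will Smith.",
--     "Could probably pull a goth girl GF.",
--     "Got that drip.",
--     "W collector.",
--     "Mogging everyone else",
--     "The huzz calls him pookie.",
--     "Radiates protagonist energy.",
--     "Literally goated.",
--     "Figured out how to actually mew.",
--     "Almost maxed out.",
--     "Won at life.",
-- ]
--
-- def get_aura_tagline(aura: int):
--     '''Get the aura tagline for a given aura value.'''
--     index = max(0, min(15, aura // 10 + 4))
--     return TAGLINES[index]
-- ===== Notes on version B (the rewrite author's own statement) =====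
-- stated objective: simpler
-- what changed: Replaced the sixteen-entry range-table scan with direct arithmetic bucketing: a clamped floor-division bucket index into a flat tagline list, valid because every range has width ten aligned to multiples of ten.
import Mathlib
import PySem

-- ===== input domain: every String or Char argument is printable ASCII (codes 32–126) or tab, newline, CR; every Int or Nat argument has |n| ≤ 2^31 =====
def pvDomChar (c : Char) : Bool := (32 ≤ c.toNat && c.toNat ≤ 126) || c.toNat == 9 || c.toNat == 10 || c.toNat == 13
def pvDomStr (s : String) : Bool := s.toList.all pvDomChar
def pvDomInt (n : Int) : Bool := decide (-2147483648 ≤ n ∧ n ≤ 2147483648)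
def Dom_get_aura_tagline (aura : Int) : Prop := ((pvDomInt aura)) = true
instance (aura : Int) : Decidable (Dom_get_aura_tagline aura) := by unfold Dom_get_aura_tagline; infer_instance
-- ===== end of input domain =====

-- B replaces A's scan of a sixteen-entry range table with arithmetic bucketing
-- (a clamped floor-division bucket index into a flat tagline list): simpler, same O(1) cost.

-- ===== PORT A =====
-- Bounds are Option Int: 'none' stands for ±inf (float('-inf') as a lower bound and
-- float('inf') as an upper bound compare True against every int in Python — exact here).
def auraRanges : List (Option Int × Option Int × String) :=
  [(none, some (-30), "Actually cooked."),
   (some (-30), some (-20), "Forgot to mute their mic."),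
   (some (-20), some (-10), "Overshared after first date."),
   (some (-10), some 0, "Got up with their backpack open"),
   (some 0, some 10, "Novice aura farmer."),
   (some 10, some 20, "Autographed their own paper for Will Smith."),
   (some 20, some 30, "Could probably pull a goth girl GF."),
   (some 30, some 40, "Got that drip."),
   (some 40, some 50, "W collector."),
   (some 50, some 60, "Mogging everyone else"),
   (some 60, some 70, "The huzz calls him pookie."),
   (some 70, some 80, "Radiates protagonist energy."),
   (some 80, some 90, "Literally goated."),
   (some 90, some 100, "Figured out how to actually mew."),
   (some 100, some 110, "Almost maxed out."),
   (some 110, none, "Won at life.")]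

def lowerLeB : Option Int → Int → Bool
  | none, _ => true      -- -inf ≤ aura
  | some v, x => v ≤ x

def ltUpperB : Int → Option Int → Bool
  | _, none => true      -- aura < inf
  | x, some v => x < v

-- the 'for … return' loop; "" is the (unreachable for ints) fall-through where Python returns None
def auraLoop (aura : Int) : List (Option Int × Option Int × String) → String
  | [] => ""
  | (lo, hi, tag) :: rest =>
      if lowerLeB lo aura && ltUpperB aura hi then tag else auraLoop aura rest

def get_aura_tagline (aura : Int) : String := auraLoop aura auraRanges

-- ===== PORT B =====
def taglines : List String :=
  ["Actually cooked.",
   "Forgot to mute their mic.",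
   "Overshared after first date.",
   "Got up with their backpack open",
   "Novice aura farmer.",
   "Autographed their own paper for Will Smith.",
   "Could probably pull a goth girl GF.",
   "Got that drip.",
   "W collector.",
   "Mogging everyone else",
   "The huzz calls him pookie.",
   "Radiates protagonist energy.",
   "Literally goated.",
   "Figured out how to actually mew.",
   "Almost maxed out.",
   "Won at life."]

def get_aura_tagline_alt (aura : Int) : String :=
  taglines.getD (max 0 (min 15 (PySem.Int.floordiv aura 10 + 4))).toNat ""

-- ===== PRECONDITION & SPEC =====
def Spec_get_aura_tagline (aura : Int) (out : String) : Prop := out = get_aura_tagline_alt aura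
instance (aura : Int) (out : String) : Decidable (Spec_get_aura_tagline aura out) := by unfold Spec_get_aura_tagline; infer_instance

-- ===== CLAIM (what is proved, stated in full; the proofs are below) =====
def Claim_equal_get_aura_tagline : Prop := ∀ (aura : Int), Dom_get_aura_tagline aura → Spec_get_aura_tagline aura (get_aura_tagline aura)

-- ===== LEMMAS AND PROOFS =====
theorem alt_eq_of_idx (aura : Int) (k : Nat)
    (h : max 0 (min 15 (PySem.Int.floordiv aura 10 + 4)) = (k : Int)) :
    get_aura_tagline_alt aura = taglines.getD k "" := by
  unfold get_aura_tagline_alt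
  rw [h, Int.toNat_natCast]

-- ===== VERDICT (by name: the statement is the Claim_ definition above) =====
set_option maxHeartbeats 1000000 in
theorem get_aura_tagline_spec : Claim_equal_get_aura_tagline := by
  intro aura _
  unfold Spec_get_aura_tagline
  have hq := PySem.Int.floordiv_mul_add_mod aura 10
  have hr0 : 0 ≤ PySem.Int.mod aura 10 := PySem.Int.mod_nonneg aura (by omega)
  have hr1 : PySem.Int.mod aura 10 < 10 := PySem.Int.mod_lt aura (by omega)
  simp only [get_aura_tagline, auraRanges, auraLoop, lowerLeB, ltUpperB,
    Bool.and_eq_true, decide_eq_true_eq]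
  by_cases h0 : aura < (-30 : Int)
  · rw [if_pos (show True ∧ aura < -30 from ⟨trivial, by omega⟩),
        alt_eq_of_idx aura 0 (by simp only [max_def, min_def]; split_ifs <;> omega)]
    rfl
  by_cases h1 : aura < (-20 : Int)
  · rw [if_neg (show ¬(True ∧ aura < -30) from fun hc => absurd hc.2 (by omega)),
        if_pos (show -30 ≤ aura ∧ aura < -20 by omega),
        alt_eq_of_idx aura 1 (by simp only [max_def, min_def]; split_ifs <;> omega)]
    rfl
  by_cases h2 : aura < (-10 : Int)
  · rw [if_neg (show ¬(True ∧ aura < -30) from fun hc => absurd hc.2 (by omega)),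
        if_neg (show ¬(-30 ≤ aura ∧ aura < -20) by omega),
        if_pos (show -20 ≤ aura ∧ aura < -10 by omega),
        alt_eq_of_idx aura 2 (by simp only [max_def, min_def]; split_ifs <;> omega)]
    rfl
  by_cases h3 : aura < (0 : Int)
  · rw [if_neg (show ¬(True ∧ aura < -30) from fun hc => absurd hc.2 (by omega)),
        if_neg (show ¬(-30 ≤ aura ∧ aura < -20) by omega),
        if_neg (show ¬(-20 ≤ aura ∧ aura < -10) by omega),
        if_pos (show -10 ≤ aura ∧ aura < 0 by omega),
        alt_eq_of_idx aura 3 (by simp only [max_def, min_def]; split_ifs <;> omega)]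
    rfl
  by_cases h4 : aura < (10 : Int)
  · rw [if_neg (show ¬(True ∧ aura < -30) from fun hc => absurd hc.2 (by omega)),
        if_neg (show ¬(-30 ≤ aura ∧ aura < -20) by omega),
        if_neg (show ¬(-20 ≤ aura ∧ aura < -10) by omega),
        if_neg (show ¬(-10 ≤ aura ∧ aura < 0) by omega),
        if_pos (show 0 ≤ aura ∧ aura < 10 by omega),
        alt_eq_of_idx aura 4 (by simp only [max_def, min_def]; split_ifs <;> omega)]
    rfl
  by_cases h5 : aura < (20 : Int)
  · rw [if_neg (show ¬(True ∧ aura < -30) from fun hc => absurd hc.2 (by omega)),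
        if_neg (show ¬(-30 ≤ aura ∧ aura < -20) by omega),
        if_neg (show ¬(-20 ≤ aura ∧ aura < -10) by omega),
        if_neg (show ¬(-10 ≤ aura ∧ aura < 0) by omega),
        if_neg (show ¬(0 ≤ aura ∧ aura < 10) by omega),
        if_pos (show 10 ≤ aura ∧ aura < 20 by omega),
        alt_eq_of_idx aura 5 (by simp only [max_def, min_def]; split_ifs <;> omega)]
    rfl
  by_cases h6 : aura < (30 : Int)
  · rw [if_neg (show ¬(True ∧ aura < -30) from fun hc => absurd hc.2 (by omega)),
        if_neg (show ¬(-30 ≤ aura ∧ aura < -20) by omega),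
        if_neg (show ¬(-20 ≤ aura ∧ aura < -10) by omega),
        if_neg (show ¬(-10 ≤ aura ∧ aura < 0) by omega),
        if_neg (show ¬(0 ≤ aura ∧ aura < 10) by omega),
        if_neg (show ¬(10 ≤ aura ∧ aura < 20) by omega),
        if_pos (show 20 ≤ aura ∧ aura < 30 by omega),
        alt_eq_of_idx aura 6 (by simp only [max_def, min_def]; split_ifs <;> omega)]
    rfl
  by_cases h7 : aura < (40 : Int)
  · rw [if_neg (show ¬(True ∧ aura < -30) from fun hc => absurd hc.2 (by omega)),
        if_neg (show ¬(-30 ≤ aura ∧ aura < -20) by omega),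
        if_neg (show ¬(-20 ≤ aura ∧ aura < -10) by omega),
        if_neg (show ¬(-10 ≤ aura ∧ aura < 0) by omega),
        if_neg (show ¬(0 ≤ aura ∧ aura < 10) by omega),
        if_neg (show ¬(10 ≤ aura ∧ aura < 20) by omega),
        if_neg (show ¬(20 ≤ aura ∧ aura < 30) by omega),
        if_pos (show 30 ≤ aura ∧ aura < 40 by omega),
        alt_eq_of_idx aura 7 (by simp only [max_def, min_def]; split_ifs <;> omega)]
    rfl
  by_cases h8 : aura < (50 : Int)
  · rw [if_neg (show ¬(True ∧ aura < -30) from fun hc => absurd hc.2 (by omega)),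
        if_neg (show ¬(-30 ≤ aura ∧ aura < -20) by omega),
        if_neg (show ¬(-20 ≤ aura ∧ aura < -10) by omega),
        if_neg (show ¬(-10 ≤ aura ∧ aura < 0) by omega),
        if_neg (show ¬(0 ≤ aura ∧ aura < 10) by omega),
        if_neg (show ¬(10 ≤ aura ∧ aura < 20) by omega),
        if_neg (show ¬(20 ≤ aura ∧ aura < 30) by omega),
        if_neg (show ¬(30 ≤ aura ∧ aura < 40) by omega),
        if_pos (show 40 ≤ aura ∧ aura < 50 by omega),
        alt_eq_of_idx aura 8 (by simp only [max_def, min_def]; split_ifs <;> omega)]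
    rfl
  by_cases h9 : aura < (60 : Int)
  · rw [if_neg (show ¬(True ∧ aura < -30) from fun hc => absurd hc.2 (by omega)),
        if_neg (show ¬(-30 ≤ aura ∧ aura < -20) by omega),
        if_neg (show ¬(-20 ≤ aura ∧ aura < -10) by omega),
        if_neg (show ¬(-10 ≤ aura ∧ aura < 0) by omega),
        if_neg (show ¬(0 ≤ aura ∧ aura < 10) by omega),
        if_neg (show ¬(10 ≤ aura ∧ aura < 20) by omega),
        if_neg (show ¬(20 ≤ aura ∧ aura < 30) by omega),
        if_neg (show ¬(30 ≤ aura ∧ aura < 40) by omega),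
        if_neg (show ¬(40 ≤ aura ∧ aura < 50) by omega),
        if_pos (show 50 ≤ aura ∧ aura < 60 by omega),
        alt_eq_of_idx aura 9 (by simp only [max_def, min_def]; split_ifs <;> omega)]
    rfl
  by_cases h10 : aura < (70 : Int)
  · rw [if_neg (show ¬(True ∧ aura < -30) from fun hc => absurd hc.2 (by omega)),
        if_neg (show ¬(-30 ≤ aura ∧ aura < -20) by omega),
        if_neg (show ¬(-20 ≤ aura ∧ aura < -10) by omega),
        if_neg (show ¬(-10 ≤ aura ∧ aura < 0) by omega),
        if_neg (show ¬(0 ≤ aura ∧ aura < 10) by omega),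
        if_neg (show ¬(10 ≤ aura ∧ aura < 20) by omega),
        if_neg (show ¬(20 ≤ aura ∧ aura < 30) by omega),
        if_neg (show ¬(30 ≤ aura ∧ aura < 40) by omega),
        if_neg (show ¬(40 ≤ aura ∧ aura < 50) by omega),
        if_neg (show ¬(50 ≤ aura ∧ aura < 60) by omega),
        if_pos (show 60 ≤ aura ∧ aura < 70 by omega),
        alt_eq_of_idx aura 10 (by simp only [max_def, min_def]; split_ifs <;> omega)]
    rfl
  by_cases h11 : aura < (80 : Int)
  · rw [if_neg (show ¬(True ∧ aura < -30) from fun hc => absurd hc.2 (by omega)),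
        if_neg (show ¬(-30 ≤ aura ∧ aura < -20) by omega),
        if_neg (show ¬(-20 ≤ aura ∧ aura < -10) by omega),
        if_neg (show ¬(-10 ≤ aura ∧ aura < 0) by omega),
        if_neg (show ¬(0 ≤ aura ∧ aura < 10) by omega),
        if_neg (show ¬(10 ≤ aura ∧ aura < 20) by omega),
        if_neg (show ¬(20 ≤ aura ∧ aura < 30) by omega),
        if_neg (show ¬(30 ≤ aura ∧ aura < 40) by omega),
        if_neg (show ¬(40 ≤ aura ∧ aura < 50) by omega),
        if_neg (show ¬(50 ≤ aura ∧ aura < 60) by omega),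
        if_neg (show ¬(60 ≤ aura ∧ aura < 70) by omega),
        if_pos (show 70 ≤ aura ∧ aura < 80 by omega),
        alt_eq_of_idx aura 11 (by simp only [max_def, min_def]; split_ifs <;> omega)]
    rfl
  by_cases h12 : aura < (90 : Int)
  · rw [if_neg (show ¬(True ∧ aura < -30) from fun hc => absurd hc.2 (by omega)),
        if_neg (show ¬(-30 ≤ aura ∧ aura < -20) by omega),
        if_neg (show ¬(-20 ≤ aura ∧ aura < -10) by omega),
        if_neg (show ¬(-10 ≤ aura ∧ aura < 0) by omega),
        if_neg (show ¬(0 ≤ aura ∧ aura < 10) by omega),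
        if_neg (show ¬(10 ≤ aura ∧ aura < 20) by omega),
        if_neg (show ¬(20 ≤ aura ∧ aura < 30) by omega),
        if_neg (show ¬(30 ≤ aura ∧ aura < 40) by omega),
        if_neg (show ¬(40 ≤ aura ∧ aura < 50) by omega),
        if_neg (show ¬(50 ≤ aura ∧ aura < 60) by omega),
        if_neg (show ¬(60 ≤ aura ∧ aura < 70) by omega),
        if_neg (show ¬(70 ≤ aura ∧ aura < 80) by omega),
        if_pos (show 80 ≤ aura ∧ aura < 90 by omega),
        alt_eq_of_idx aura 12 (by simp only [max_def, min_def]; split_ifs <;> omega)]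
    rfl
  by_cases h13 : aura < (100 : Int)
  · rw [if_neg (show ¬(True ∧ aura < -30) from fun hc => absurd hc.2 (by omega)),
        if_neg (show ¬(-30 ≤ aura ∧ aura < -20) by omega),
        if_neg (show ¬(-20 ≤ aura ∧ aura < -10) by omega),
        if_neg (show ¬(-10 ≤ aura ∧ aura < 0) by omega),
        if_neg (show ¬(0 ≤ aura ∧ aura < 10) by omega),
        if_neg (show ¬(10 ≤ aura ∧ aura < 20) by omega),
        if_neg (show ¬(20 ≤ aura ∧ aura < 30) by omega),
        if_neg (show ¬(30 ≤ aura ∧ aura < 40) by omega),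
        if_neg (show ¬(40 ≤ aura ∧ aura < 50) by omega),
        if_neg (show ¬(50 ≤ aura ∧ aura < 60) by omega),
        if_neg (show ¬(60 ≤ aura ∧ aura < 70) by omega),
        if_neg (show ¬(70 ≤ aura ∧ aura < 80) by omega),
        if_neg (show ¬(80 ≤ aura ∧ aura < 90) by omega),
        if_pos (show 90 ≤ aura ∧ aura < 100 by omega),
        alt_eq_of_idx aura 13 (by simp only [max_def, min_def]; split_ifs <;> omega)]
    rfl
  by_cases h14 : aura < (110 : Int)
  · rw [if_neg (show ¬(True ∧ aura < -30) from fun hc => absurd hc.2 (by omega)),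
        if_neg (show ¬(-30 ≤ aura ∧ aura < -20) by omega),
        if_neg (show ¬(-20 ≤ aura ∧ aura < -10) by omega),
        if_neg (show ¬(-10 ≤ aura ∧ aura < 0) by omega),
        if_neg (show ¬(0 ≤ aura ∧ aura < 10) by omega),
        if_neg (show ¬(10 ≤ aura ∧ aura < 20) by omega),
        if_neg (show ¬(20 ≤ aura ∧ aura < 30) by omega),
        if_neg (show ¬(30 ≤ aura ∧ aura < 40) by omega),
        if_neg (show ¬(40 ≤ aura ∧ aura < 50) by omega),
        if_neg (show ¬(50 ≤ aura ∧ aura < 60) by omega),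
        if_neg (show ¬(60 ≤ aura ∧ aura < 70) by omega),
        if_neg (show ¬(70 ≤ aura ∧ aura < 80) by omega),
        if_neg (show ¬(80 ≤ aura ∧ aura < 90) by omega),
        if_neg (show ¬(90 ≤ aura ∧ aura < 100) by omega),
        if_pos (show 100 ≤ aura ∧ aura < 110 by omega),
        alt_eq_of_idx aura 14 (by simp only [max_def, min_def]; split_ifs <;> omega)]
    rfl
  rw [if_neg (show ¬(True ∧ aura < -30) from fun hc => absurd hc.2 (by omega)),
      if_neg (show ¬(-30 ≤ aura ∧ aura < -20) by omega),
      if_neg (show ¬(-20 ≤ aura ∧ aura < -10) by omega),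
      if_neg (show ¬(-10 ≤ aura ∧ aura < 0) by omega),
      if_neg (show ¬(0 ≤ aura ∧ aura < 10) by omega),
      if_neg (show ¬(10 ≤ aura ∧ aura < 20) by omega),
      if_neg (show ¬(20 ≤ aura ∧ aura < 30) by omega),
      if_neg (show ¬(30 ≤ aura ∧ aura < 40) by omega),
      if_neg (show ¬(40 ≤ aura ∧ aura < 50) by omega),
      if_neg (show ¬(50 ≤ aura ∧ aura < 60) by omega),
      if_neg (show ¬(60 ≤ aura ∧ aura < 70) by omega),
      if_neg (show ¬(70 ≤ aura ∧ aura < 80) by omega),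
      if_neg (show ¬(80 ≤ aura ∧ aura < 90) by omega),
      if_neg (show ¬(90 ≤ aura ∧ aura < 100) by omega),
      if_neg (show ¬(100 ≤ aura ∧ aura < 110) by omega),
      if_pos (show 110 ≤ aura ∧ True from ⟨by omega, trivial⟩),
      alt_eq_of_idx aura 15 (by simp only [max_def, min_def]; split_ifs <;> omega)]
  rfl
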